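-- pv_equiv track=rewrite | github.com/Yoxem/Clochur | src/Clochur/Parser.py | remove_comment
-- ===== SOURCE A (Python) =====
-- def remove_comment(series):
--     result = []
--     is_comment_token = False
--     for i in series:
--         if i["token"] == "%":
--             is_comment_token = True
--         elif i["token"] == "\n":
--             if is_comment_token == True:
--                 is_comment_token = False
--             else:
--                 result.append(i)
--         elif is_comment_token == True:
--             pass
--         else:
--             result.append(i)
--
--     return result
-- ===== SOURCE B (Python) =====
-- def remove_comment(series):
--     # Group-then-trim: collect tokens of the current line, flush at each newline,
--     # keeping the pre-'%' prefix and the newline only if the line had no '%'.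
--     result = []
--     line = []
--     for tok in series:
--         if tok["token"] == "\n":
--             commented = any(t["token"] == "%" for t in line)
--             for t in line:
--                 if t["token"] == "%":
--                     break
--                 result.append(t)
--             if not commented:
--                 result.append(tok)
--             line = []
--         else:
--             line.append(tok)
--     for t in line:
--         if t["token"] == "%":
--             break
--         result.append(t)
--     return result
-- ===== Notes on version B (the rewrite author's own statement) =====
-- stated objective: alternative
-- what changed: Replaces the flag-threaded single state machine with a group-then-trim pass: tokens are buffered per line, and at each newline the pre-'%' prefix is emitted, the newline kept only if the line had no '%'.
import Mathlib
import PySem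

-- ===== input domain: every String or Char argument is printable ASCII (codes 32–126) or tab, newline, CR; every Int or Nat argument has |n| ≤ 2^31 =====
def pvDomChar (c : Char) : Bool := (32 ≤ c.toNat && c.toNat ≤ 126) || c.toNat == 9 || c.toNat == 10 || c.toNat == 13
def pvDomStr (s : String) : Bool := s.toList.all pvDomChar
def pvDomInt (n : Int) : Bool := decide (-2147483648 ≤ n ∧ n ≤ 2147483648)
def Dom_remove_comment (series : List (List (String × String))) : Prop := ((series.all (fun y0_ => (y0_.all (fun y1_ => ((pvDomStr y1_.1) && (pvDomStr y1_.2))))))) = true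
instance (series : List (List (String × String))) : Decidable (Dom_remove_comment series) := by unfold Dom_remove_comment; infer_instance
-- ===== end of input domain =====

-- B replaces A's flag-threaded state machine with a per-line group-then-trim pass (alternative decomposition, same cost).

-- i["token"]: first-match lookup in the association list (none = KeyError, excluded by Pre_)
def pvTok (i : List (String × String)) : Option String := (PySem.Dict.mk i).get? "token"

-- ===== PORT A =====
-- the for-loop with state (result, is_comment_token), as tail recursion
def loopA : List (List (String × String)) → List (List (String × String)) → Bool → List (List (String × String))
  | [], result, _ => result
  | i :: rest, result, isc =>
    if pvTok i = some "%" then loopA rest result true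
    else if pvTok i = some "\n" then
      (if isc then loopA rest result false else loopA rest (result ++ [i]) isc)
    else if isc then loopA rest result isc
    else loopA rest (result ++ [i]) isc

def remove_comment (series : List (List (String × String))) : List (List (String × String)) :=
  loopA series [] false

-- ===== PORT B =====
-- the inner 'for t in line: if %: break; append' loop
def takeToPct : List (List (String × String)) → List (List (String × String))
  | [] => []
  | t :: ts => if pvTok t = some "%" then [] else t :: takeToPct ts

-- any(t["token"] == "%" for t in line)
def hasPct (line : List (List (String × String))) : Bool :=
  line.any (fun t => pvTok t = some "%")

-- the outer loop with state (emitted so far is the returned prefix, current line buffer)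
def loopB : List (List (String × String)) → List (List (String × String)) → List (List (String × String))
  | line, [] => takeToPct line
  | line, tok :: rest =>
    if pvTok tok = some "\n" then
      takeToPct line ++ (if hasPct line then [] else [tok]) ++ loopB [] rest
    else loopB (line ++ [tok]) rest

def remove_comment_alt (series : List (List (String × String))) : List (List (String × String)) :=
  loopB [] series

-- ===== PRECONDITION & SPEC =====
-- Pre_ excludes exactly the inputs where Python A raises KeyError: a token dict without key "token".
def Pre_remove_comment (series : List (List (String × String))) : Prop :=
  ∀ i ∈ series, (pvTok i).isSome
instance (series : List (List (String × String))) : Decidable (Pre_remove_comment series) := by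
  unfold Pre_remove_comment; infer_instance

def pvWitness_remove_comment : (List (List (String × String))) :=
  [[("token", "a")], [("token", "%")], [("token", "x")], [("token", "\n")], [("token", "b")]]

def Spec_remove_comment (series : List (List (String × String))) (out : List (List (String × String))) : Prop := out = remove_comment_alt series
instance (series : List (List (String × String))) (out : List (List (String × String))) : Decidable (Spec_remove_comment series out) := by unfold Spec_remove_comment; infer_instance

-- ===== CLAIM (what is proved, stated in full; the proofs are below) =====
def Claim_equal_remove_comment : Prop := ∀ (series : List (List (String × String))), Dom_remove_comment series → Pre_remove_comment series → Spec_remove_comment series (remove_comment series)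

-- ===== LEMMAS AND PROOFS =====

theorem loopA_acc (l : List (List (String × String))) :
    ∀ (r : List (List (String × String))) (b : Bool), loopA l r b = r ++ loopA l [] b := by
  induction l with
  | nil => simp [loopA]
  | cons i rest ih =>
    intro r b
    simp only [loopA]
    split_ifs with h1 h2 h3 h4
    · exact ih r true
    · exact ih r false
    · simp only [List.nil_append]; rw [ih (r ++ [i]) b, ih [i] b]; simp
    · exact ih r b
    · simp only [List.nil_append]; rw [ih (r ++ [i]) b, ih [i] b]; simp

theorem takeToPct_append (line tok : _) :
    takeToPct (line ++ [tok]) =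
      if hasPct line then takeToPct line
      else takeToPct line ++ (if pvTok tok = some "%" then [] else [tok]) := by
  induction line with
  | nil => simp [takeToPct, hasPct]
  | cons t ts ih =>
    by_cases h : pvTok t = some "%"
    · simp [takeToPct, hasPct, h]
    · have hh : hasPct (t :: ts) = hasPct ts := by simp [hasPct, h]
      simp only [List.cons_append, takeToPct, if_neg h, ih, hh]
      by_cases hb : hasPct ts = true
      · simp [hb]
      · simp only [Bool.not_eq_true] at hb; simp [hb]

theorem hasPct_append (line tok : _) :
    hasPct (line ++ [tok]) = (hasPct line || decide (pvTok tok = some "%")) := by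
  simp [hasPct]

theorem loopB_eq_loopA (l : List (List (String × String))) :
    ∀ line, loopB line l = takeToPct line ++ loopA l [] (hasPct line) := by
  induction l with
  | nil => intro line; simp [loopB, loopA]
  | cons tok rest ih =>
    intro line
    by_cases hp : pvTok tok = some "%"
    · have hn : ¬ pvTok tok = some "\n" := by simp [hp]
      have hd : decide (pvTok tok = some "%") = true := by simp [hp]
      simp only [loopB, loopA, if_neg hn, if_pos hp, ih (line ++ [tok]),
        takeToPct_append, hasPct_append, hd, Bool.or_true]
      by_cases hb : hasPct line = true
      · simp [hb]
      · simp only [Bool.not_eq_true] at hb; simp [hb]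
    · by_cases hn : pvTok tok = some "\n"
      · have h0 : takeToPct ([] : List (List (String × String))) = [] := rfl
        have h1 : hasPct ([] : List (List (String × String))) = false := rfl
        simp only [loopB, loopA, if_pos hn, if_neg hp, ih [], h0, h1, List.nil_append]
        by_cases hb : hasPct line = true
        · simp [hb]
        · simp only [Bool.not_eq_true] at hb
          simp [hb, loopA_acc rest [tok]]
      · have hd : decide (pvTok tok = some "%") = false := by simp [hp]
        simp only [loopB, loopA, if_neg hn, if_neg hp, ih (line ++ [tok]),
          takeToPct_append, hasPct_append, hd, Bool.or_false]
        by_cases hb : hasPct line = true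
        · simp [hb]
        · simp only [Bool.not_eq_true] at hb
          simp [hb, loopA_acc rest [tok]]

-- ===== VERDICT (by name: the statement is the Claim_ definition above) =====
theorem remove_comment_spec : Claim_equal_remove_comment := by
  intro series _ _
  unfold Spec_remove_comment remove_comment remove_comment_alt
  rw [loopB_eq_loopA]
  simp [takeToPct, hasPct]
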